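-- pv_equiv track=rewrite | github.com/cardozaf000/smart-cabinet-monitoring-platform | backend/app/routes/network_routes.py | _strip_dhcpcd_block
-- ===== SOURCE A (Python) =====
-- _BLOCK_DIRECTIVES = (
--     "static ", "fallback ", "inform ", "option ",
--     "request ", "nohook ", "nodhcp ", "noipv6 ", "slaac ",
-- )
--
-- def _strip_dhcpcd_block(content, iface):
--     """Elimina el bloque 'interface <iface>' (y 'profile static_<iface>') del conf."""
--     profile_name = f"static_{iface}"
--     lines = content.splitlines()
--     result = []
--     skip = False
--
--     for line in lines:
--         stripped = line.strip()
--
--         # Inicio de bloque a eliminar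
--         if stripped == f"profile {profile_name}" or stripped == f"interface {iface}":
--             skip = True
--             continue
--
--         # Inicio de otro bloque → dejar de saltar
--         if skip and (stripped.startswith("interface ") or stripped.startswith("profile ")):
--             skip = False
--
--         if skip:
--             # Directivas del bloque → saltar
--             if stripped == "" or stripped.startswith("#") or \
--                any(stripped.startswith(d) for d in _BLOCK_DIRECTIVES):
--                 if stripped == "":   # línea en blanco cierra el bloque
--                     skip = False
--                 continue
--             else:
--                 skip = False   # línea inesperada → dejar de saltar
--
--         result.append(line)
--
--     return "\n".join(result).rstrip() + "\n"
-- ===== SOURCE B (Python) =====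
-- _BLOCK_DIRECTIVES = (
--     "static ", "fallback ", "inform ", "option ",
--     "request ", "nohook ", "nodhcp ", "noipv6 ", "slaac ",
-- )
--
-- def _strip_dhcpcd_block(content, iface):
--     """Elimina el bloque 'interface <iface>' (y 'profile static_<iface>') del conf."""
--     hdr_iface = f"interface {iface}"
--     hdr_profile = f"profile static_{iface}"
--     lines = content.splitlines()
--     n = len(lines)
--     result = []
--     i = 0
--     while i < n:
--         line = lines[i]
--         if line.strip() in (hdr_iface, hdr_profile):
--             # drop the header, then walk the block with an inner loop
--             i += 1
--             while i < n:
--                 t = lines[i].strip()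
--                 if t in (hdr_iface, hdr_profile):
--                     i += 1          # same block re-opened: keep dropping
--                 elif t.startswith("interface ") or t.startswith("profile "):
--                     break           # another block starts: keep the line
--                 elif t == "":
--                     i += 1          # blank line closes the block (dropped)
--                     break
--                 elif t.startswith("#") or t.startswith(_BLOCK_DIRECTIVES):
--                     i += 1          # block member: drop
--                 else:
--                     break           # unexpected line ends the block, kept
--         else:
--             result.append(line)
--             i += 1
--     return "\n".join(result).rstrip() + "\n"
-- ===== Notes on version B (the rewrite author's own statement) =====
-- stated objective: alternative
-- what changed: Replaces A's single pass with a persistent skip flag by an index walk whose inner loop consumes one config block at a time (block-at-a-time decomposition instead of flag-carrying state machine).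
import Mathlib
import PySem

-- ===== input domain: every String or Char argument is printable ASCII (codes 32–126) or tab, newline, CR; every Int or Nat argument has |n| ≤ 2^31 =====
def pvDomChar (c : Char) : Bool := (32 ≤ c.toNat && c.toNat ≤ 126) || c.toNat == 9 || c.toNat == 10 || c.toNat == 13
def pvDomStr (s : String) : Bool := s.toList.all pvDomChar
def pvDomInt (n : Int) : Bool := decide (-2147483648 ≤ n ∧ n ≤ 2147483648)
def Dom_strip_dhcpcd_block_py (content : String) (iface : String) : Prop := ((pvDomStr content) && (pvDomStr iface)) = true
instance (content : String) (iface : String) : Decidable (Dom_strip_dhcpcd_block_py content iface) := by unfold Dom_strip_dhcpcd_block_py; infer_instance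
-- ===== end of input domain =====

-- B replaces A's persistent skip flag by an explicit outer walk plus an inner loop that
-- consumes one block at a time (objective: alternative decomposition, same cost).

def pvDirectives : List String :=
  ["static ", "fallback ", "inform ", "option ",
   "request ", "nohook ", "nodhcp ", "noipv6 ", "slaac "]

-- ===== PORT A =====
-- the body of A's for-loop, one step of the fold over (result, skip)
def pvStepA (profile_name : String) (iface : String)
    (acc : List String × Bool) (line : String) : List String × Bool :=
  let result := acc.1
  let skip := acc.2
  let stripped := PySem.Str.strip line
  if stripped == "profile " ++ profile_name || stripped == "interface " ++ iface then
    (result, true)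
  else
    let skip := if skip && (PySem.Str.startswith stripped "interface "
                            || PySem.Str.startswith stripped "profile ") then false else skip
    if skip then
      if stripped == "" || PySem.Str.startswith stripped "#"
          || pvDirectives.any (fun d => PySem.Str.startswith stripped d) then
        (result, if stripped == "" then false else skip)
      else
        (result ++ [line], false)
    else
      (result ++ [line], skip)

def strip_dhcpcd_block_py (content : String) (iface : String) : String :=
  let profile_name := "static_" ++ iface
  let lines := PySem.Str.splitlines content
  let st := lines.foldl (pvStepA profile_name iface) ([], false)
  PySem.Str.rstrip (PySem.Str.join "\n" st.1) ++ "\n"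

-- ===== PORT B =====
-- inner while loop: consume the lines of one block, return the remaining lines
def pvInnerB (h1 h2 : String) : List String → List String
  | [] => []
  | line :: rest =>
    let t := PySem.Str.strip line
    if t == h1 || t == h2 then pvInnerB h1 h2 rest
    else if PySem.Str.startswith t "interface " || PySem.Str.startswith t "profile " then
      line :: rest
    else if t == "" then rest
    else if PySem.Str.startswith t "#" || pvDirectives.any (fun d => PySem.Str.startswith t d) then
      pvInnerB h1 h2 rest
    else
      line :: rest

theorem pvInnerB_length (h1 h2 : String) (l : List String) :
    (pvInnerB h1 h2 l).length ≤ l.length := by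
  induction l with
  | nil => simp [pvInnerB]
  | cons line rest ih =>
    simp only [pvInnerB]
    split
    · exact Nat.le_succ_of_le ih
    · split
      · exact Nat.le_refl _
      · split
        · exact Nat.le_succ _
        · split
          · exact Nat.le_succ_of_le ih
          · exact Nat.le_refl _

-- outer while loop over the lines
def pvOuterB (h1 h2 : String) : List String → List String
  | [] => []
  | line :: rest =>
    if PySem.Str.strip line == h1 || PySem.Str.strip line == h2 then
      pvOuterB h1 h2 (pvInnerB h1 h2 rest)
    else
      line :: pvOuterB h1 h2 rest
  termination_by l => l.length
  decreasing_by
    exact Nat.lt_succ_of_le (pvInnerB_length h1 h2 rest)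
    simp

def strip_dhcpcd_block_py_alt (content : String) (iface : String) : String :=
  let h1 := "interface " ++ iface
  let h2 := "profile static_" ++ iface
  let lines := PySem.Str.splitlines content
  PySem.Str.rstrip (PySem.Str.join "\n" (pvOuterB h1 h2 lines)) ++ "\n"

-- ===== PRECONDITION & SPEC =====
def Spec_strip_dhcpcd_block_py (content : String) (iface : String) (out : String) : Prop := out = strip_dhcpcd_block_py_alt content iface
instance (content : String) (iface : String) (out : String) : Decidable (Spec_strip_dhcpcd_block_py content iface out) := by unfold Spec_strip_dhcpcd_block_py; infer_instance

-- ===== CLAIM (what is proved, stated in full; the proofs are below) =====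
def Claim_equal_strip_dhcpcd_block_py : Prop := ∀ (content : String) (iface : String), Dom_strip_dhcpcd_block_py content iface → Spec_strip_dhcpcd_block_py content iface (strip_dhcpcd_block_py content iface)

-- ===== LEMMAS AND PROOFS =====

theorem pvMain (iface : String) (lines : List String) : ∀ acc : List String,
    (List.foldl (pvStepA ("static_" ++ iface) iface) (acc, false) lines).1
      = acc ++ pvOuterB ("interface " ++ iface) ("profile static_" ++ iface) lines
  ∧ (List.foldl (pvStepA ("static_" ++ iface) iface) (acc, true) lines).1
      = acc ++ pvOuterB ("interface " ++ iface) ("profile static_" ++ iface)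
          (pvInnerB ("interface " ++ iface) ("profile static_" ++ iface) lines) := by
  induction lines with
  | nil => intro acc; constructor <;> simp [pvOuterB, pvInnerB]
  | cons line rest ih =>
    intro acc
    have hpp : ("profile " ++ ("static_" ++ iface) : String) = "profile static_" ++ iface := by
      rw [← String.append_assoc]; rfl
    by_cases hH : (PySem.Str.strip line = "interface " ++ iface
                   ∨ PySem.Str.strip line = "profile static_" ++ iface)
    · -- header line: both sides drop it and go into skip / inner mode
      have hbA : (PySem.Str.strip line == "profile " ++ ("static_" ++ iface)
                  || PySem.Str.strip line == "interface " ++ iface) = true := by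
        rw [hpp]; rcases hH with h | h <;> simp [h]
      have hbB : (PySem.Str.strip line == "interface " ++ iface
                  || PySem.Str.strip line == "profile static_" ++ iface) = true := by
        rcases hH with h | h <;> simp [h]
      constructor
      · simp only [List.foldl, pvStepA, hbA, if_true]
        rw [(ih acc).2]
        congr 1
        rw [pvOuterB]; simp [hbB]
      · simp only [List.foldl, pvStepA, hbA, if_true]
        rw [(ih acc).2]
        congr 2
        conv_rhs => rw [pvInnerB]
        simp [hbB]
    · push Not at hH
      have hbA : (PySem.Str.strip line == "profile " ++ ("static_" ++ iface)
                  || PySem.Str.strip line == "interface " ++ iface) = false := by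
        simp [hpp, hH.1, hH.2]
      have hbB : (PySem.Str.strip line == "interface " ++ iface
                  || PySem.Str.strip line == "profile static_" ++ iface) = false := by
        simp [hH.1, hH.2]
      constructor
      · -- skip = false, non-header: both keep the line
        simp only [List.foldl, pvStepA, hbA]
        simp only [Bool.false_and, Bool.false_eq_true, if_false, Bool.false_and,
                   reduceIte]
        rw [(ih (acc ++ [line])).1]
        rw [pvOuterB]; simp [hbB]
      · -- skip = true, non-header: classify the line
        cases hSW : (PySem.Str.startswith (PySem.Str.strip line) "interface "
                     || PySem.Str.startswith (PySem.Str.strip line) "profile ") with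
        | true =>
          simp only [List.foldl, pvStepA, hbA, hSW]
          simp only [Bool.true_and, if_true, Bool.false_eq_true, if_false, reduceIte]
          rw [(ih (acc ++ [line])).1]
          conv_rhs => rw [pvInnerB]
          simp only [hbB, Bool.false_eq_true, if_false, hSW, if_true, reduceIte]
          rw [pvOuterB]; simp [hbB]
        | false =>
          by_cases hE : PySem.Str.strip line = ""
          · -- blank line: dropped, block closes
            have hE' : (PySem.Str.strip line == "") = true := by simp [hE]
            simp only [List.foldl, pvStepA, hbA, hSW]
            simp only [Bool.true_and, Bool.false_eq_true, if_false, hE',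
                       Bool.true_or, if_true]
            rw [(ih acc).1]
            conv_rhs => rw [pvInnerB]
            simp only [hbB, Bool.false_eq_true, if_false, hSW, hE', if_true]
          · cases hD : (PySem.Str.startswith (PySem.Str.strip line) "#"
                        || pvDirectives.any (fun d => PySem.Str.startswith (PySem.Str.strip line) d)) with
            | true =>
              -- comment / directive: dropped, stay in block
              simp only [List.foldl, pvStepA, hbA, hSW]
              have hE' : (PySem.Str.strip line == "") = false := by simp [hE]
              simp only [Bool.true_and, Bool.false_eq_true, if_false, hE', hD,
                         Bool.false_or, if_true]
              rw [(ih acc).2]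
              congr 2
              conv_rhs => rw [pvInnerB]
              simp only [hbB, Bool.false_eq_true, if_false, hSW, hE', hD, if_true]
            | false =>
              -- unexpected line: kept, block ends
              simp only [List.foldl, pvStepA, hbA, hSW]
              have hE' : (PySem.Str.strip line == "") = false := by simp [hE]
              simp only [Bool.true_and, Bool.false_eq_true, if_false, hE', hD,
                         Bool.false_or, reduceIte]
              rw [(ih (acc ++ [line])).1]
              conv_rhs => rw [pvInnerB]
              simp only [hbB, Bool.false_eq_true, if_false, hSW, hE', hD, reduceIte]
              rw [pvOuterB]; simp [hbB]

-- ===== VERDICT (by name: the statement is the Claim_ definition above) =====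
theorem strip_dhcpcd_block_py_spec : Claim_equal_strip_dhcpcd_block_py := by
  intro content iface _
  unfold Spec_strip_dhcpcd_block_py strip_dhcpcd_block_py strip_dhcpcd_block_py_alt
  simp only []
  rw [(pvMain iface (PySem.Str.splitlines content) []).1]
  simp
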